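-- pv_equiv track=rewrite | github.com/adityachallapally/rldk | src/rldk/anomaly_detector.py | _generate_training_recommendations
-- ===== SOURCE A (Python) =====
-- from typing import Dict, List, Optional, Any, Union, Tuple
--
-- def _generate_training_recommendations(training_anomalies: List[str]) -> List[str]:
--     """Generate training-specific recommendations"""
--     recommendations = []
--
--     loss_spikes = [a for a in training_anomalies if 'Loss spike' in a]
--     reward_drops = [a for a in training_anomalies if 'Reward drop' in a]
--     kl_spikes = [a for a in training_anomalies if 'KL divergence spike' in a]
--
--     if loss_spikes:
--         recommendations.append(f"Detected {len(loss_spikes)} loss spikes. Consider reducing learning rate or checking data quality.")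
--
--     if reward_drops:
--         recommendations.append(f"Detected {len(reward_drops)} reward drops. Check reward model stability and training data.")
--
--     if kl_spikes:
--         recommendations.append(f"Detected {len(kl_spikes)} KL divergence spikes. Consider adjusting KL penalty coefficient.")
--
--     return recommendations
-- ===== SOURCE B (Python) =====
-- from typing import Dict, List, Optional, Any, Union, Tuple
--
-- _TABLE = [
--     ("Loss spike", " loss spikes. Consider reducing learning rate or checking data quality."),
--     ("Reward drop", " reward drops. Check reward model stability and training data."),
--     ("KL divergence spike", " KL divergence spikes. Consider adjusting KL penalty coefficient."),
-- ]
--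
-- def _generate_training_recommendations(training_anomalies: List[str]) -> List[str]:
--     """Generate training-specific recommendations (one counting pass + table-driven emit)"""
--     counts = [0] * len(_TABLE)
--     for item in training_anomalies:
--         counts = [c + (1 if sub in item else 0) for (sub, _), c in zip(_TABLE, counts)]
--     return ["Detected %d%s" % (c, tail) for (_, tail), c in zip(_TABLE, counts) if c > 0]
-- ===== Notes on version B (the rewrite author's own statement) =====
-- stated objective: alternative
-- what changed: Replaced the three separate filtering scans of the input with a single counting pass that increments a per-category counter vector, followed by a table-driven emit pass over the ordered (substring, message-tail) table.
import Mathlib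
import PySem

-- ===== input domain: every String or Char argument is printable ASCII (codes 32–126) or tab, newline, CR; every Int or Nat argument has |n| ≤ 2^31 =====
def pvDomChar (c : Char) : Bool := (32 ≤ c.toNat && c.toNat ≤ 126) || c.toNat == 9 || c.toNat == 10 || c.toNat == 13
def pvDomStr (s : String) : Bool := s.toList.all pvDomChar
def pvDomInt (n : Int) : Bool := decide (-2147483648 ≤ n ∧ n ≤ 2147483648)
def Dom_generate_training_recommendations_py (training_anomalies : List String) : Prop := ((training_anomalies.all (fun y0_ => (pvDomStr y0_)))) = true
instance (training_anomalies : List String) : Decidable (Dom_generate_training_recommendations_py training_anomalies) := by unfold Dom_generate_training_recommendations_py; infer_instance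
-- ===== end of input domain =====

-- B replaces A's three filtering scans with one counting pass plus a table-driven emit pass (alternative decomposition, same cost class).

-- ===== PORT A =====
def generate_training_recommendations_py (training_anomalies : List String) : List String :=
  let recommendations : List String := []
  let loss_spikes := training_anomalies.filter (fun a => PySem.Str.isIn "Loss spike" a)
  let reward_drops := training_anomalies.filter (fun a => PySem.Str.isIn "Reward drop" a)
  let kl_spikes := training_anomalies.filter (fun a => PySem.Str.isIn "KL divergence spike" a)
  let recommendations := if loss_spikes ≠ [] then
      recommendations ++ ["Detected " ++ PySem.Int.toStr (loss_spikes.length : Int) ++ " loss spikes. Consider reducing learning rate or checking data quality."]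
    else recommendations
  let recommendations := if reward_drops ≠ [] then
      recommendations ++ ["Detected " ++ PySem.Int.toStr (reward_drops.length : Int) ++ " reward drops. Check reward model stability and training data."]
    else recommendations
  let recommendations := if kl_spikes ≠ [] then
      recommendations ++ ["Detected " ++ PySem.Int.toStr (kl_spikes.length : Int) ++ " KL divergence spikes. Consider adjusting KL penalty coefficient."]
    else recommendations
  recommendations

-- ===== PORT B =====
def pvTable : List (String × String) :=
  [("Loss spike", " loss spikes. Consider reducing learning rate or checking data quality."),
   ("Reward drop", " reward drops. Check reward model stability and training data."),
   ("KL divergence spike", " KL divergence spikes. Consider adjusting KL penalty coefficient.")]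

def generate_training_recommendations_py_alt (training_anomalies : List String) : List String :=
  let counts0 : List Int := pvTable.map (fun _ => (0 : Int))
  let counts := training_anomalies.foldl
    (fun cs item => List.zipWith (fun (p : String × String) c => c + (if PySem.Str.isIn p.1 item then (1 : Int) else 0)) pvTable cs) counts0
  ((pvTable.zip counts).filter (fun q => decide (q.2 > 0))).map
    (fun q => "Detected " ++ PySem.Int.toStr q.2 ++ q.1.2)

-- ===== PRECONDITION & SPEC =====
def Spec_generate_training_recommendations_py (training_anomalies : List String) (out : List String) : Prop := out = generate_training_recommendations_py_alt training_anomalies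
instance (training_anomalies : List String) (out : List String) : Decidable (Spec_generate_training_recommendations_py training_anomalies out) := by unfold Spec_generate_training_recommendations_py; infer_instance

-- ===== CLAIM (what is proved, stated in full; the proofs are below) =====
def Claim_equal_generate_training_recommendations_py : Prop := ∀ (training_anomalies : List String), Dom_generate_training_recommendations_py training_anomalies → Spec_generate_training_recommendations_py training_anomalies (generate_training_recommendations_py training_anomalies)

-- ===== LEMMAS AND PROOFS =====

-- the counting fold of B computes the three countP values
theorem pv_fold_counts (ta : List String) (c1 c2 c3 : Int) :
    ta.foldl (fun cs item => List.zipWith (fun (p : String × String) c => c + (if PySem.Str.isIn p.1 item then (1 : Int) else 0))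
      [("Loss spike", " loss spikes. Consider reducing learning rate or checking data quality."),
       ("Reward drop", " reward drops. Check reward model stability and training data."),
       ("KL divergence spike", " KL divergence spikes. Consider adjusting KL penalty coefficient.")] cs) [c1, c2, c3]
    = [c1 + (ta.countP (fun a => PySem.Str.isIn "Loss spike" a) : Int),
       c2 + (ta.countP (fun a => PySem.Str.isIn "Reward drop" a) : Int),
       c3 + (ta.countP (fun a => PySem.Str.isIn "KL divergence spike" a) : Int)] := by
  induction ta generalizing c1 c2 c3 with
  | nil => simp
  | cons x xs ih =>
    simp only [List.foldl_cons, List.zipWith, List.countP_cons]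
    rw [ih]
    push_cast
    split_ifs <;> simp <;> omega

theorem pv_filter_ne_nil_iff (p : String → Bool) (ta : List String) :
    (ta.filter p ≠ []) ↔ 0 < (ta.countP p : Int) := by
  rw [List.countP_eq_length_filter]
  simp [List.length_pos_iff_ne_nil]

-- ===== VERDICT (by name: the statement is the Claim_ definition above) =====
theorem generate_training_recommendations_py_spec : Claim_equal_generate_training_recommendations_py := by
  intro ta _
  unfold Spec_generate_training_recommendations_py
  unfold generate_training_recommendations_py generate_training_recommendations_py_alt
  simp only [pvTable, List.map, List.zip, pv_fold_counts ta 0 0 0, Int.zero_add,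
    ← List.countP_eq_length_filter,
    pv_filter_ne_nil_iff (fun a => PySem.Str.isIn "Loss spike" a) ta,
    pv_filter_ne_nil_iff (fun a => PySem.Str.isIn "Reward drop" a) ta,
    pv_filter_ne_nil_iff (fun a => PySem.Str.isIn "KL divergence spike" a) ta]
  by_cases b1 : 0 < (ta.countP (fun a => PySem.Str.isIn "Loss spike" a) : Int) <;>
  by_cases b2 : 0 < (ta.countP (fun a => PySem.Str.isIn "Reward drop" a) : Int) <;>
  by_cases b3 : 0 < (ta.countP (fun a => PySem.Str.isIn "KL divergence spike" a) : Int) <;>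
    simp only [b1, b2, b3, List.zipWith, List.filter_cons, List.filter_nil,
      decide_true, decide_false, if_true, if_false,
      List.map_cons, List.map_nil, List.nil_append] <;> simp
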